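-- pv_equiv track=rewrite | github.com/nrfconnect/sdk-zephyr | scripts/gen_relocate_app.py | assign_to_correct_mem_region
-- ===== SOURCE A (Python) =====
-- def assign_to_correct_mem_region(memory_type,
--                                  full_list_of_sections, complete_list_of_sections):
--     all_regions = False
--     iteration_sections = {"text":False, "rodata":False, "data":False, "bss":False}
--     if "_TEXT" in memory_type:
--         iteration_sections["text"] = True
--         memory_type = memory_type.replace("_TEXT", "")
--     if "_RODATA" in memory_type:
--         iteration_sections["rodata"] = True
--         memory_type = memory_type.replace("_RODATA", "")
--     if "_DATA" in memory_type:
--         iteration_sections["data"] = True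
--         memory_type = memory_type.replace("_DATA", "")
--     if "_BSS" in memory_type:
--         iteration_sections["bss"] = True
--         memory_type = memory_type.replace("_BSS", "")
--     if not (iteration_sections["data"] or iteration_sections["bss"] or
--             iteration_sections["text"] or iteration_sections["rodata"]):
--         all_regions = True
--
--     if memory_type in complete_list_of_sections:
--         for iter_sec in ["text", "rodata", "data", "bss"]:
--             if ((iteration_sections[iter_sec] or all_regions) and
--                     full_list_of_sections[iter_sec] != []):
--                 complete_list_of_sections[memory_type][iter_sec] += (
--                     full_list_of_sections[iter_sec])
--     else:
--         #new memory type was found. in which case just assign the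
--         # full_list_of_sections to the memorytype dict
--         tmp_list = {"text":[], "rodata":[], "data":[], "bss":[]}
--         for iter_sec in ["text", "rodata", "data", "bss"]:
--             if ((iteration_sections[iter_sec] or all_regions) and
--                     full_list_of_sections[iter_sec] != []):
--                 tmp_list[iter_sec] = full_list_of_sections[iter_sec]
--
--         complete_list_of_sections[memory_type] = tmp_list
--
--     return complete_list_of_sections
-- ===== SOURCE B (Python) =====
-- def assign_to_correct_mem_region(memory_type,
--                                  full_list_of_sections, complete_list_of_sections):
--     # Pure rebuild instead of in-place mutation: a recursive suffix parse, then the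
--     # merged entry is computed by a single dict comprehension and the result dict is
--     # reconstructed; the caller's dicts are never mutated (A mutates its argument).
--     def parse(mt, table):
--         if not table:
--             return mt, frozenset()
--         (suffix, sec), rest = table[0], table[1:]
--         if suffix in mt:
--             stripped, found = parse(mt.replace(suffix, ""), rest)
--             return stripped, found | {sec}
--         return parse(mt, rest)
--
--     mt, active = parse(memory_type,
--                        [("_TEXT", "text"), ("_RODATA", "rodata"),
--                         ("_DATA", "data"), ("_BSS", "bss")])
--     keep = active or frozenset(("text", "rodata", "data", "bss"))
--     base = complete_list_of_sections.get(mt)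
--     if base is None:
--         base = {"text": [], "rodata": [], "data": [], "bss": []}
--     merged = {sec: vals + full_list_of_sections[sec]
--                    if sec in keep and full_list_of_sections[sec] else vals
--               for sec, vals in base.items()}
--     result = dict(complete_list_of_sections)
--     result[mt] = merged
--     return result
-- ===== Notes on version B (the rewrite author's own statement) =====
-- stated objective: alternative
-- what changed: A's four copy-pasted suffix ifs plus two imperative in-place branches (+= into the existing inner dict vs building tmp_list for a new key) are replaced by a recursive table-driven suffix parse and a pure rebuild: the merged inner entry is computed by one dict comprehension over the base entry (existing entry or empty template) and a fresh outer dict is returned, never mutating the arguments.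
import Mathlib
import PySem

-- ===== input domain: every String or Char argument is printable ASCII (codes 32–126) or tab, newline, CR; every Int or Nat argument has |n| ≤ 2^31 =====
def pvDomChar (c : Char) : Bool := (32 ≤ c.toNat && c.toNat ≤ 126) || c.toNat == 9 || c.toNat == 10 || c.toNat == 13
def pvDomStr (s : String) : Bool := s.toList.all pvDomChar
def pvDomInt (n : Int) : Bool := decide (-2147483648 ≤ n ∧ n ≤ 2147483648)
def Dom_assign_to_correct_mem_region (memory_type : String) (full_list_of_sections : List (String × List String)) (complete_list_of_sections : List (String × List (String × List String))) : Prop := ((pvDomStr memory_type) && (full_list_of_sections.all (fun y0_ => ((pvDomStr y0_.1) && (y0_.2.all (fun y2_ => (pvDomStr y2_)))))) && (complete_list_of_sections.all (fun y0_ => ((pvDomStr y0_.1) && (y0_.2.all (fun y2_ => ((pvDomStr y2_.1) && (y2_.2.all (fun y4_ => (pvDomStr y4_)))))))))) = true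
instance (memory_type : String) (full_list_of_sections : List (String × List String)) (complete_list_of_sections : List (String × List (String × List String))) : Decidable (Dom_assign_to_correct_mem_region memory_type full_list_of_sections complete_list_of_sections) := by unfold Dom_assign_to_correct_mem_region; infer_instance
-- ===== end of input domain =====

-- B replaces A's four copy-pasted suffix ifs and two imperative in-place merge branches by a
-- recursive table-driven suffix parse plus a pure rebuild (one dict comprehension for the merged
-- entry, fresh output dict). A mutates complete_list_of_sections in place, B does not: the
-- equivalence proved here is about the RETURN value only.

-- ===== PORT A =====
def assign_to_correct_mem_region (memory_type : String) (full_list_of_sections : List (String × List String)) (complete_list_of_sections : List (String × List (String × List String))) : List (String × List (String × List String)) :=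
  let its0 : PySem.Dict String Bool := PySem.Dict.ofList [("text", false), ("rodata", false), ("data", false), ("bss", false)]
  let p1 := if PySem.Str.isIn "_TEXT" memory_type then (its0.insert "text" true, PySem.Str.replace memory_type "_TEXT" "") else (its0, memory_type)
  let p2 := if PySem.Str.isIn "_RODATA" p1.2 then (p1.1.insert "rodata" true, PySem.Str.replace p1.2 "_RODATA" "") else p1
  let p3 := if PySem.Str.isIn "_DATA" p2.2 then (p2.1.insert "data" true, PySem.Str.replace p2.2 "_DATA" "") else p2
  let p4 := if PySem.Str.isIn "_BSS" p3.2 then (p3.1.insert "bss" true, PySem.Str.replace p3.2 "_BSS" "") else p3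
  let its := p4.1
  let mt := p4.2
  let all_regions := !(its.getD "data" false || its.getD "bss" false || its.getD "text" false || its.getD "rodata" false)
  let full : PySem.Dict String (List String) := PySem.Dict.ofList full_list_of_sections
  let complete : PySem.Dict String (PySem.Dict String (List String)) :=
    PySem.Dict.ofList (complete_list_of_sections.map (fun p => (p.1, PySem.Dict.ofList p.2)))
  let res :=
    if complete.contains mt then
      -- complete[mt][sec] += full[sec]; the missing-key KeyErrors are excluded by Pre_
      (["text", "rodata", "data", "bss"]).foldl (fun comp sec =>
        if (its.getD sec false || all_regions) && !(full.getD sec []).isEmpty then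
          comp.modify mt PySem.Dict.empty (fun inner => inner.modify sec [] (· ++ full.getD sec []))
        else comp) complete
    else
      let tmp := (["text", "rodata", "data", "bss"]).foldl (fun (t : PySem.Dict String (List String)) sec =>
        if (its.getD sec false || all_regions) && !(full.getD sec []).isEmpty then
          t.insert sec (full.getD sec [])
        else t) (PySem.Dict.ofList [("text", []), ("rodata", []), ("data", []), ("bss", [])])
      complete.insert mt tmp
  res.items.map (fun p => (p.1, p.2.items))

-- ===== PORT B =====
-- recursive suffix parse over the (suffix, section) table; frozenset union '| {sec}' is ported
-- as PySem.Set.add (the set is only queried by membership afterwards, never iterated)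
def pvParseTable : String → List (String × String) → String × PySem.Set String
  | mt, [] => (mt, PySem.Set.empty)
  | mt, (suffix, sec) :: rest =>
    if PySem.Str.isIn suffix mt then
      let r := pvParseTable (PySem.Str.replace mt suffix "") rest
      (r.1, PySem.Set.add r.2 sec)
    else pvParseTable mt rest

def assign_to_correct_mem_region_alt (memory_type : String) (full_list_of_sections : List (String × List String)) (complete_list_of_sections : List (String × List (String × List String))) : List (String × List (String × List String)) :=
  let p := pvParseTable memory_type [("_TEXT", "text"), ("_RODATA", "rodata"), ("_DATA", "data"), ("_BSS", "bss")]
  let mt := p.1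
  let active := p.2
  let keep : PySem.Set String := if active.isEmpty then PySem.Set.ofList ["text", "rodata", "data", "bss"] else active
  let full : PySem.Dict String (List String) := PySem.Dict.ofList full_list_of_sections
  let complete : PySem.Dict String (PySem.Dict String (List String)) :=
    PySem.Dict.ofList (complete_list_of_sections.map (fun q => (q.1, PySem.Dict.ofList q.2)))
  let base := match complete.get? mt with
    | some b => b
    | none => PySem.Dict.ofList [("text", []), ("rodata", []), ("data", []), ("bss", [])]
  -- dict comprehension over base.items; full[sec] is only read where Pre_ guarantees the key
  let merged : PySem.Dict String (List String) :=
    PySem.Dict.ofList (base.items.map (fun q =>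
      (q.1, if PySem.Set.contains keep q.1 && !(full.getD q.1 []).isEmpty then q.2 ++ full.getD q.1 [] else q.2)))
  let result := complete.insert mt merged
  result.items.map (fun q => (q.1, q.2.items))

-- ===== PRECONDITION & SPEC =====
-- pvStrip mirrors A's suffix-stripping phase; Pre_ needs it to name the stripped key and flags
def pvStrip (memory_type : String) : PySem.Dict String Bool × String :=
  let its0 : PySem.Dict String Bool := PySem.Dict.ofList [("text", false), ("rodata", false), ("data", false), ("bss", false)]
  let p1 := if PySem.Str.isIn "_TEXT" memory_type then (its0.insert "text" true, PySem.Str.replace memory_type "_TEXT" "") else (its0, memory_type)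
  let p2 := if PySem.Str.isIn "_RODATA" p1.2 then (p1.1.insert "rodata" true, PySem.Str.replace p1.2 "_RODATA" "") else p1
  let p3 := if PySem.Str.isIn "_DATA" p2.2 then (p2.1.insert "data" true, PySem.Str.replace p2.2 "_DATA" "") else p2
  if PySem.Str.isIn "_BSS" p3.2 then (p3.1.insert "bss" true, PySem.Str.replace p3.2 "_BSS" "") else p3

-- Pre_ excludes exactly the inputs on which the Python A raises KeyError: a section that the
-- (suffix-stripped) memory type flags for merging but that is missing from full_list_of_sections,
-- or missing from the existing inner dict of the stripped memory type.
def Pre_assign_to_correct_mem_region (memory_type : String) (full_list_of_sections : List (String × List String)) (complete_list_of_sections : List (String × List (String × List String))) : Prop :=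
  (let its := (pvStrip memory_type).1
   let m4 := (pvStrip memory_type).2
   let all := !(its.getD "data" false || its.getD "bss" false || its.getD "text" false || its.getD "rodata" false)
   let flag : String → Bool := fun sec => its.getD sec false || all
   let full : PySem.Dict String (List String) := PySem.Dict.ofList full_list_of_sections
   let comp : PySem.Dict String (PySem.Dict String (List String)) :=
     PySem.Dict.ofList (complete_list_of_sections.map (fun p => (p.1, PySem.Dict.ofList p.2)))
   (["text", "rodata", "data", "bss"]).all (fun sec =>
     !(flag sec) ||
       (full.contains sec &&
         (!(comp.contains m4) || (full.getD sec []).isEmpty ||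
           (comp.getD m4 PySem.Dict.empty).contains sec)))) = true
instance (memory_type : String) (full_list_of_sections : List (String × List String)) (complete_list_of_sections : List (String × List (String × List String))) : Decidable (Pre_assign_to_correct_mem_region memory_type full_list_of_sections complete_list_of_sections) := by unfold Pre_assign_to_correct_mem_region; infer_instance

def pvWitness_assign_to_correct_mem_region : String × (List (String × List String)) × (List (String × List (String × List String))) :=
  ("SRAM_TEXT", [("text", ["a"]), ("rodata", []), ("data", []), ("bss", [])],
   [("SRAM", [("text", []), ("rodata", []), ("data", []), ("bss", [])])])

def Spec_assign_to_correct_mem_region (memory_type : String) (full_list_of_sections : List (String × List String)) (complete_list_of_sections : List (String × List (String × List String))) (out : List (String × List (String × List String))) : Prop := out = assign_to_correct_mem_region_alt memory_type full_list_of_sections complete_list_of_sections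
instance (memory_type : String) (full_list_of_sections : List (String × List String)) (complete_list_of_sections : List (String × List (String × List String))) (out : List (String × List (String × List String))) : Decidable (Spec_assign_to_correct_mem_region memory_type full_list_of_sections complete_list_of_sections out) := by unfold Spec_assign_to_correct_mem_region; infer_instance

-- ===== CLAIM (what is proved, stated in full; the proofs are below) =====
def Claim_equal_assign_to_correct_mem_region : Prop := ∀ (memory_type : String) (full_list_of_sections : List (String × List String)) (complete_list_of_sections : List (String × List (String × List String))), Dom_assign_to_correct_mem_region memory_type full_list_of_sections complete_list_of_sections → Pre_assign_to_correct_mem_region memory_type full_list_of_sections complete_list_of_sections → Spec_assign_to_correct_mem_region memory_type full_list_of_sections complete_list_of_sections (assign_to_correct_mem_region memory_type full_list_of_sections complete_list_of_sections)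

-- ===== LEMMAS AND PROOFS =====

def pvFour : List String := ["text", "rodata", "data", "bss"]

def pvTbl : List (String × String) := [("_TEXT", "text"), ("_RODATA", "rodata"), ("_DATA", "data"), ("_BSS", "bss")]

def pvKeep (m : String) : PySem.Set String :=
  let active := (pvParseTable m pvTbl).2
  if active.isEmpty then PySem.Set.ofList pvFour else active

def pvCond (m : String) (full : PySem.Dict String (List String)) (sec : String) : Bool :=
  PySem.Set.contains (pvKeep m) sec && !(full.getD sec []).isEmpty

theorem pvParse_snd (m : String) :
    (pvParseTable m pvTbl).1 = (pvStrip m).2 := by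
  unfold pvStrip pvTbl
  simp only [pvParseTable]
  split_ifs <;> rfl

-- A's flag booleans agree with membership in B's active set, and all_regions with its emptiness
theorem pvActive_flag (m : String) (sec : String) (h : sec ∈ pvFour) :
    (pvStrip m).1.getD sec false = PySem.Set.contains (pvParseTable m pvTbl).2 sec := by
  fin_cases h <;>
    (unfold pvStrip pvTbl; simp only [pvParseTable]; split_ifs <;> rfl)

theorem pvActive_all (m : String) :
    (!((pvStrip m).1.getD "data" false || (pvStrip m).1.getD "bss" false || (pvStrip m).1.getD "text" false || (pvStrip m).1.getD "rodata" false)) = (pvParseTable m pvTbl).2.isEmpty := by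
  unfold pvStrip pvTbl
  simp only [pvParseTable]
  split_ifs <;> rfl

-- everything the parse table ever adds is one of its section names
theorem pvParse_sub (tbl : List (String × String)) : ∀ (mt k : String),
    PySem.Set.contains (pvParseTable mt tbl).2 k = true → k ∈ tbl.map Prod.snd := by
  induction tbl with
  | nil =>
    intro mt k h
    rw [show (pvParseTable mt []).2 = PySem.Set.empty from rfl] at h
    cases h
  | cons p rest ih =>
    intro mt k h
    rw [show pvParseTable mt (p :: rest)
        = if PySem.Str.isIn p.1 mt then
            ((pvParseTable (PySem.Str.replace mt p.1 "") rest).1, PySem.Set.add (pvParseTable (PySem.Str.replace mt p.1 "") rest).2 p.2)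
          else pvParseTable mt rest from by cases p; rfl] at h
    by_cases hc : PySem.Str.isIn p.1 mt = true
    · rw [if_pos hc] at h
      rcases (PySem.Set.mem_add _ _ _).mp ((PySem.Set.contains_iff _ _).mp h) with hm | hm
      · exact List.mem_cons_of_mem _ (ih _ k ((PySem.Set.contains_iff _ _).mpr hm))
      · simp [hm]
    · rw [if_neg hc] at h
      exact List.mem_cons_of_mem _ (ih _ k h)

theorem pvKeep_contains (m : String) (sec : String) (h : sec ∈ pvFour) :
    PySem.Set.contains (pvKeep m) sec
      = (PySem.Set.contains (pvParseTable m pvTbl).2 sec || (pvParseTable m pvTbl).2.isEmpty) := by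
  unfold pvKeep
  by_cases he : ((pvParseTable m pvTbl).2 : List String).isEmpty = true
  · rw [if_pos he, he]
    rw [List.isEmpty_iff.mp he]
    fin_cases h <;> rfl
  · rw [if_neg he]
    rw [Bool.not_eq_true] at he
    rw [he, Bool.or_false]

theorem pvFlag_eq (m : String) (sec : String) (h : sec ∈ pvFour) :
    ((pvStrip m).1.getD sec false || !((pvStrip m).1.getD "data" false || (pvStrip m).1.getD "bss" false || (pvStrip m).1.getD "text" false || (pvStrip m).1.getD "rodata" false)) = PySem.Set.contains (pvKeep m) sec := by
  rw [pvActive_flag m sec h, pvActive_all m, pvKeep_contains m sec h]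

theorem pvKeep_subset (m : String) (k : String) (h : PySem.Set.contains (pvKeep m) k = true) : k ∈ pvFour := by
  unfold pvKeep at h
  by_cases he : ((pvParseTable m pvTbl).2 : List String).isEmpty = true
  · rw [if_pos he] at h
    simpa [pvFour] using (PySem.Set.mem_ofList _ _).mp ((PySem.Set.contains_iff _ _).mp h)
  · rw [if_neg he] at h
    simpa [pvFour, pvTbl] using pvParse_sub pvTbl m k h

theorem pvInsert_get?_self {κ ν : Type} [BEq κ] [LawfulBEq κ] (d : PySem.Dict κ ν) (k : κ) (v : ν)
    (hnd : d.keys.Nodup) (h : d.get? k = some v) : d.insert k v = d := by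
  apply PySem.Dict.ext
  rw [PySem.Dict.items_insert_of_contains d v (by rw [PySem.Dict.contains_eq_isSome_get?, h]; rfl)]
  have hid : ∀ p ∈ d.items, (if p.1 == k then (k, v) else p) = p := by
    intro p hp
    by_cases hk : p.1 = k
    · have hg := PySem.Dict.get?_of_mem_items d (k := p.1) (v := p.2) (by simpa using hp) hnd
      rw [hk, h] at hg
      subst hk
      simp [Option.some.inj hg]
    · simp [hk]
  rw [List.map_congr_left hid, List.map_id']

theorem pvModify_items {κ ν : Type} [BEq κ] [LawfulBEq κ] (d : PySem.Dict κ ν) (k : κ) (d0 : ν) (f : ν → ν)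
    (hnd : d.keys.Nodup) (hc : d.contains k = true) :
    (d.modify k d0 f).items = d.items.map (fun p => if p.1 == k then (p.1, f p.2) else p) := by
  show ((d.insert k (f (d.getD k d0)))).items = _
  rw [PySem.Dict.items_insert_of_contains d _ hc]
  apply List.map_congr_left
  intro p hp
  by_cases hk : p.1 = k
  · have hg := PySem.Dict.getD_of_mem_items d (k := p.1) (v := p.2) (by simpa using hp) hnd d0
    rw [hk] at hg
    simp [hk, hg]
  · simp [hk]

-- the inner merge loop of A, expressed as one map over the items (B's comprehension shape)
theorem pvInnerFold_items (full : PySem.Dict String (List String)) (cond : String → Bool)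
    (secs : List String) (d : PySem.Dict String (List String))
    (hnd : d.keys.Nodup) (hsec : secs.Nodup)
    (hc : ∀ s ∈ secs, cond s = true → d.contains s = true) :
    (secs.foldl (fun d s => if cond s then d.modify s [] (· ++ full.getD s []) else d) d).items
      = d.items.map (fun q => if decide (q.1 ∈ secs) && cond q.1 then (q.1, q.2 ++ full.getD q.1 []) else q) := by
  induction secs generalizing d with
  | nil => simp
  | cons s rest ih =>
    simp only [List.foldl_cons]
    rcases List.nodup_cons.mp hsec with ⟨hsnotin, hrest⟩
    by_cases hcs : cond s = true
    · rw [if_pos hcs]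
      have hcont := hc s (by simp) hcs
      have hnd' : (d.modify s [] (· ++ full.getD s [])).keys.Nodup := by
        rw [PySem.Dict.keys_modify, PySem.Dict.keys_insert_of_contains d _ hcont]; exact hnd
      rw [ih _ hnd' hrest (fun t ht hct => by
            rw [PySem.Dict.contains_modify, hc t (by simp [ht]) hct]; simp)]
      rw [pvModify_items d s [] _ hnd hcont, List.map_map]
      apply List.map_congr_left
      intro p _
      by_cases hk : p.1 = s
      · simp [Function.comp, hk, hcs, hsnotin]
      · by_cases hmem : p.1 ∈ rest <;> simp [Function.comp, hmem, hk]
    · rw [if_neg hcs]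
      rw [ih _ hnd hrest (fun t ht hct => hc t (by simp [ht]) hct)]
      apply List.map_congr_left
      intro p _
      by_cases hk : p.1 = s
      · simp [hk, hcs]
      · by_cases hmem : p.1 ∈ rest <;> simp [hmem, hk]

-- A's tmp_list loop for a new key, expressed as one map over the items
theorem pvInsertFold_items (cond : String → Bool) (g : String → List String)
    (secs : List String) (d : PySem.Dict String (List String))
    (hnd : d.keys.Nodup) (hsec : secs.Nodup)
    (hc : ∀ s ∈ secs, d.contains s = true) :
    (secs.foldl (fun t s => if cond s then t.insert s (g s) else t) d).items
      = d.items.map (fun q => if decide (q.1 ∈ secs) && cond q.1 then (q.1, g q.1) else q) := by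
  induction secs generalizing d with
  | nil => simp
  | cons s rest ih =>
    simp only [List.foldl_cons]
    rcases List.nodup_cons.mp hsec with ⟨hsnotin, hrest⟩
    by_cases hcs : cond s = true
    · rw [if_pos hcs]
      have hcont := hc s (by simp)
      have hnd' : (d.insert s (g s)).keys.Nodup := by
        rw [PySem.Dict.keys_insert_of_contains d _ hcont]; exact hnd
      rw [ih _ hnd' hrest (fun t ht => by
            rw [PySem.Dict.contains_insert, hc t (by simp [ht])]; simp)]
      rw [PySem.Dict.items_insert_of_contains d _ hcont, List.map_map]
      apply List.map_congr_left
      intro p _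
      by_cases hk : p.1 = s
      · simp [Function.comp, hk, hcs, hsnotin]
      · by_cases hmem : p.1 ∈ rest <;> simp [Function.comp, hmem, hk]
    · rw [if_neg hcs]
      rw [ih _ hnd hrest (fun t ht => hc t (by simp [ht]))]
      apply List.map_congr_left
      intro p _
      by_cases hk : p.1 = s
      · simp [hk, hcs]
      · by_cases hmem : p.1 ∈ rest <;> simp [hmem, hk]

-- A's outer loop 'complete[mt][sec] += ...' collapses to one insert at mt
theorem pvOuterFold (full : PySem.Dict String (List String)) (cond : String → Bool) (mt : String)
    (secs : List String) (comp : PySem.Dict String (PySem.Dict String (List String)))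
    (base : PySem.Dict String (List String))
    (hnd : comp.keys.Nodup) (h : comp.get? mt = some base) :
    secs.foldl (fun comp sec =>
        if cond sec then comp.modify mt PySem.Dict.empty (fun inner => inner.modify sec [] (· ++ full.getD sec [])) else comp) comp
      = comp.insert mt (secs.foldl (fun inner sec => if cond sec then inner.modify sec [] (· ++ full.getD sec []) else inner) base) := by
  induction secs generalizing comp base with
  | nil => exact (pvInsert_get?_self comp mt base hnd h).symm
  | cons s rest ih =>
    simp only [List.foldl_cons]
    by_cases hcs : cond s = true
    · rw [if_pos hcs, if_pos hcs]
      have hg : comp.getD mt PySem.Dict.empty = base := PySem.Dict.getD_of_get?_eq_some comp _ h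
      have hmod : comp.modify mt PySem.Dict.empty (fun inner => inner.modify s [] (· ++ full.getD s [])) = comp.insert mt (base.modify s [] (· ++ full.getD s [])) := by
        rw [show comp.modify mt PySem.Dict.empty (fun inner => inner.modify s [] (· ++ full.getD s [])) = comp.insert mt ((comp.getD mt PySem.Dict.empty).modify s [] (· ++ full.getD s [])) from rfl, hg]
      rw [hmod, ih (comp.insert mt (base.modify s [] (· ++ full.getD s [])))
            (base.modify s [] (· ++ full.getD s []))
            (by rw [PySem.Dict.keys_insert_of_contains comp _ (by rw [PySem.Dict.contains_eq_isSome_get?, h]; rfl)]; exact hnd)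
            (PySem.Dict.get?_insert_self _ _ _),
          PySem.Dict.insert_insert_self]
    · rw [if_neg hcs, if_neg hcs, ih comp base hnd h]

theorem pvItems_ofList {κ ν : Type} [BEq κ] [LawfulBEq κ] (l : List (κ × ν))
    (h : (l.map Prod.fst).Nodup) : (PySem.Dict.ofList l).items = l := by
  show (List.foldl (fun d (a : κ × ν) => d.insert (Prod.fst a) (Prod.snd a)) PySem.Dict.empty l).items = l
  rw [PySem.Dict.items_foldl_insert_fresh l Prod.fst Prod.snd PySem.Dict.empty
        (fun a _ => PySem.Dict.contains_empty _) h]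
  simp [show (PySem.Dict.empty : PySem.Dict κ ν).items = [] from rfl]

-- every value stored in Dict.ofList l is one of l's values
theorem pvValues_ofList_sub {κ ν : Type} [BEq κ] [LawfulBEq κ] (l : List (κ × ν)) (v : ν)
    (h : v ∈ (PySem.Dict.ofList l).values) : v ∈ l.map Prod.snd := by
  induction l using List.reverseRecOn with
  | nil =>
    rw [show (PySem.Dict.ofList ([] : List (κ × ν))).values = [] from rfl] at h
    exact absurd h (List.not_mem_nil)
  | append_singleton l' p ih =>
    have : PySem.Dict.ofList (l' ++ [p]) = (PySem.Dict.ofList l').insert p.1 p.2 := by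
      show (l' ++ [p]).foldl (fun d q => d.insert q.1 q.2) PySem.Dict.empty = _
      rw [List.foldl_append]
      rfl
    rw [this] at h
    rcases PySem.Dict.mem_values_insert _ _ _ _ h with hv | hv
    · simp [hv]
    · simpa using Or.inl (by simpa using ih hv)

-- decompositions of the two ports
def pvATail (its : PySem.Dict String Bool) (mt : String) (full : PySem.Dict String (List String)) (complete : PySem.Dict String (PySem.Dict String (List String))) : List (String × List (String × List String)) :=
  let all_regions := !(its.getD "data" false || its.getD "bss" false || its.getD "text" false || its.getD "rodata" false)
  let res :=
    if complete.contains mt then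
      pvFour.foldl (fun comp sec =>
        if (its.getD sec false || all_regions) && !(full.getD sec []).isEmpty then
          comp.modify mt PySem.Dict.empty (fun inner => inner.modify sec [] (· ++ full.getD sec []))
        else comp) complete
    else
      let tmp := pvFour.foldl (fun (t : PySem.Dict String (List String)) sec =>
        if (its.getD sec false || all_regions) && !(full.getD sec []).isEmpty then
          t.insert sec (full.getD sec [])
        else t) (PySem.Dict.ofList [("text", []), ("rodata", []), ("data", []), ("bss", [])])
      complete.insert mt tmp
  res.items.map (fun p => (p.1, p.2.items))

def pvBTail (m : String) (mt : String) (full : PySem.Dict String (List String)) (complete : PySem.Dict String (PySem.Dict String (List String))) : List (String × List (String × List String)) :=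
  let base := match complete.get? mt with
    | some b => b
    | none => PySem.Dict.ofList [("text", []), ("rodata", []), ("data", []), ("bss", [])]
  let merged : PySem.Dict String (List String) :=
    PySem.Dict.ofList (base.items.map (fun q =>
      (q.1, if pvCond m full q.1 then q.2 ++ full.getD q.1 [] else q.2)))
  let result := complete.insert mt merged
  result.items.map (fun q => (q.1, q.2.items))

theorem pvA_decomp (m : String) (f : List (String × List String)) (c : List (String × List (String × List String))) :
    assign_to_correct_mem_region m f c = pvATail (pvStrip m).1 (pvStrip m).2 (PySem.Dict.ofList f) (PySem.Dict.ofList (c.map (fun p => (p.1, PySem.Dict.ofList p.2)))) := rfl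

theorem pvB_decomp (m : String) (f : List (String × List String)) (c : List (String × List (String × List String))) :
    assign_to_correct_mem_region_alt m f c = pvBTail m (pvStrip m).2 (PySem.Dict.ofList f) (PySem.Dict.ofList (c.map (fun p => (p.1, PySem.Dict.ofList p.2)))) := by
  rw [show assign_to_correct_mem_region_alt m f c
      = pvBTail m (pvParseTable m pvTbl).1 (PySem.Dict.ofList f) (PySem.Dict.ofList (c.map (fun p => (p.1, PySem.Dict.ofList p.2)))) from rfl,
      pvParse_snd]

-- Pre_ restated per section name
theorem pvPre_unfold (m : String) (f : List (String × List String)) (c : List (String × List (String × List String)))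
    (hpre : Pre_assign_to_correct_mem_region m f c) :
    ∀ sec ∈ pvFour,
      (!((pvStrip m).1.getD sec false || !((pvStrip m).1.getD "data" false || (pvStrip m).1.getD "bss" false || (pvStrip m).1.getD "text" false || (pvStrip m).1.getD "rodata" false)) ||
        ((PySem.Dict.ofList f).contains sec &&
          (!((PySem.Dict.ofList (c.map (fun p => (p.1, PySem.Dict.ofList p.2)))).contains (pvStrip m).2) ||
            ((PySem.Dict.ofList f).getD sec []).isEmpty ||
            ((PySem.Dict.ofList (c.map (fun p => (p.1, PySem.Dict.ofList p.2)))).getD (pvStrip m).2 PySem.Dict.empty).contains sec))) = true := by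
  unfold Pre_assign_to_correct_mem_region at hpre
  intro sec hs
  exact List.all_eq_true.mp hpre sec hs

-- ===== VERDICT (by name: the statement is the Claim_ definition above) =====
theorem assign_to_correct_mem_region_spec : Claim_equal_assign_to_correct_mem_region := by
  intro m f c _ hpre
  unfold Spec_assign_to_correct_mem_region
  rw [pvA_decomp, pvB_decomp]
  set its := (pvStrip m).1 with hits
  set mt := (pvStrip m).2 with hmt
  set full : PySem.Dict String (List String) := PySem.Dict.ofList f with hfull
  set comp : PySem.Dict String (PySem.Dict String (List String)) :=
    PySem.Dict.ofList (c.map (fun p => (p.1, PySem.Dict.ofList p.2))) with hcompd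
  have hndc : comp.keys.Nodup := PySem.Dict.nodup_keys_ofList _
  have hcondA : ∀ (sec : String), sec ∈ pvFour →
      ((its.getD sec false || !(its.getD "data" false || its.getD "bss" false || its.getD "text" false || its.getD "rodata" false)) && !(full.getD sec []).isEmpty) = pvCond m full sec := by
    intro sec hs
    rw [pvCond, hits, pvFlag_eq m sec hs]
  have hpre' := pvPre_unfold m f c hpre
  unfold pvATail pvBTail
  dsimp only
  by_cases hcontains : comp.contains mt = true
  · -- existing memory type
    rw [if_pos hcontains]
    obtain ⟨base, hq⟩ : ∃ b, comp.get? mt = some b := by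
      rw [PySem.Dict.contains_eq_isSome_get?] at hcontains
      exact Option.isSome_iff_exists.mp hcontains
    have hndb : base.keys.Nodup := by
      have hvals : base ∈ comp.values :=
        List.mem_map_of_mem (PySem.Dict.mem_items_of_get?_eq_some comp hq)
      have := pvValues_ofList_sub _ _ hvals
      simp only [List.map_map] at this
      rcases List.mem_map.mp this with ⟨p, _, hp⟩
      rw [← hp]
      exact PySem.Dict.nodup_keys_ofList _
    have hcontained : ∀ s ∈ pvFour, pvCond m full s = true → base.contains s = true := by
      intro s hs hcnd
      have h1 := hpre' s hs
      rcases Bool.or_eq_true _ _ |>.mp h1 with hflag | hrest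
      · exfalso
        rw [Bool.not_eq_eq_eq_not, Bool.not_true, ← hits, pvFlag_eq m s hs] at hflag
        have h' := hcnd
        rw [pvCond, Bool.and_eq_true] at h'
        rw [h'.1] at hflag
        cases hflag
      · rw [Bool.and_eq_true] at hrest
        obtain ⟨_, h3⟩ := hrest
        rw [← hmt, ← hcompd] at h3
        rcases Bool.or_eq_true _ _ |>.mp h3 with h4 | h4
        · rcases Bool.or_eq_true _ _ |>.mp h4 with h5 | h5
          · rw [Bool.not_eq_eq_eq_not, Bool.not_true, hcontains] at h5
            cases h5
          · exfalso
            have h' := hcnd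
            rw [pvCond, Bool.and_eq_true] at h'
            rw [← hfull] at h5
            rw [h5] at h'
            simp at h'
        · rw [PySem.Dict.getD_of_get?_eq_some comp _ hq] at h4
          exact h4
    rw [PySem.List.foldl_congr_mem pvFour _ (fun comp sec =>
          if pvCond m full sec then comp.modify mt PySem.Dict.empty (fun inner => inner.modify sec [] (· ++ full.getD sec [])) else comp) comp
          (fun acc x hx => by rw [hcondA x hx]),
        pvOuterFold full (pvCond m full) mt pvFour comp base hndc hq, hq]
    have hinner : (pvFour.foldl (fun inner sec => if pvCond m full sec then inner.modify sec [] (· ++ full.getD sec []) else inner) base)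
        = PySem.Dict.ofList (base.items.map (fun q => (q.1, if pvCond m full q.1 then q.2 ++ full.getD q.1 [] else q.2))) := by
      apply PySem.Dict.ext
      rw [pvInnerFold_items full (pvCond m full) pvFour base hndb (by decide) hcontained,
          pvItems_ofList _ (by
            rw [show (base.items.map (fun q => (q.1, if pvCond m full q.1 then q.2 ++ full.getD q.1 [] else q.2))).map Prod.fst = base.items.map Prod.fst by simp]
            exact hndb)]
      apply List.map_congr_left
      intro q _
      by_cases hcnd : pvCond m full q.1 = true
      · have hmem : q.1 ∈ pvFour := pvKeep_subset m q.1 (by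
          have h' := hcnd
          rw [pvCond, Bool.and_eq_true] at h'
          exact h'.1)
        simp [hcnd, hmem]
      · simp [hcnd]
    rw [hinner]
  · -- new memory type
    rw [if_neg hcontains]
    have hq : comp.get? mt = none := by
      rw [PySem.Dict.contains_eq_isSome_get?] at hcontains
      cases hgq : comp.get? mt with
      | none => rfl
      | some b => rw [hgq] at hcontains; simp at hcontains
    rw [hq]
    rw [PySem.List.foldl_congr_mem pvFour _ (fun (t : PySem.Dict String (List String)) sec =>
          if pvCond m full sec then t.insert sec (full.getD sec []) else t) _
          (fun acc x hx => by rw [hcondA x hx])]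
    have htmp : (pvFour.foldl (fun (t : PySem.Dict String (List String)) sec => if pvCond m full sec then t.insert sec (full.getD sec []) else t)
          (PySem.Dict.ofList [("text", []), ("rodata", []), ("data", []), ("bss", [])]))
        = PySem.Dict.ofList ((PySem.Dict.ofList [("text", ([] : List String)), ("rodata", []), ("data", []), ("bss", [])]).items.map
            (fun q => (q.1, if pvCond m full q.1 then q.2 ++ full.getD q.1 [] else q.2))) := by
      apply PySem.Dict.ext
      rw [pvInsertFold_items (pvCond m full) (fun s => full.getD s []) pvFour _
            (by decide) (by decide) (by decide)]
      rw [show (PySem.Dict.ofList [("text", ([] : List String)), ("rodata", []), ("data", []), ("bss", [])]).items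
          = [("text", ([] : List String)), ("rodata", []), ("data", []), ("bss", [])] from rfl]
      rw [pvItems_ofList (List.map (fun q => (q.1, if pvCond m full q.1 then q.2 ++ full.getD q.1 [] else q.2))
            [("text", ([] : List String)), ("rodata", []), ("data", []), ("bss", [])]) (by simp)]
      apply List.map_congr_left
      intro q hq
      have hq' : q = ("text", ([] : List String)) ∨ q = ("rodata", []) ∨ q = ("data", []) ∨ q = ("bss", []) := by
        simpa using hq
      have hq2 : q.2 = ([] : List String) := by rcases hq' with h | h | h | h <;> simp [h]
      have hmemfour : q.1 ∈ pvFour := by rcases hq' with h | h | h | h <;> simp [pvFour, h]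
      by_cases hcnd : pvCond m full q.1 = true
      · simp [hcnd, hmemfour, hq2]
      · simp [hcnd]
    rw [htmp]
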